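-- pv_equiv track=rewrite | github.com/AOx0/pythonista3-CCGen | configuracion4.py | encdec2
-- ===== SOURCE A (Python) =====
-- def encdec2(message, key, mode):
--     message    = message
--     translated = ""
--     LETTERS    = "AaBbCcDdEeFfGgHhIiJjKkLlMmNnOoPpQqRrSsTtUuVvWwXxYyZz1234567890()!?,.@"
--     for symbol in message:
--         if symbol in LETTERS:
--             num = LETTERS.find(symbol)
--             if mode ==   "cifrar":
--                 num = num + key
--             elif mode == "descifrar":
--                 num = num - key
--
--             if num >= len(LETTERS):
--                 num -= len(LETTERS)
--             elif num < 0: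
--                 num += len(LETTERS)
--
--             translated += LETTERS[num]
--         else:
--             translated += symbol
--
--     message = translated
--     return message
-- ===== SOURCE B (Python) =====
-- LETTERS = "AaBbCcDdEeFfGgHhIiJjKkLlMmNnOoPpQqRrSsTtUuVvWwXxYyZz1234567890()!?,.@"
--
-- def encdec2(message, key, mode):
--     shift = key if mode == "cifrar" else -key if mode == "descifrar" else 0
--     r = shift % len(LETTERS)
--     rotated = LETTERS[r:] + LETTERS[:r]
--     table = str.maketrans(LETTERS, rotated)
--     return message.translate(table)
-- ===== Notes on version B (the rewrite author's own statement) =====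
-- stated objective: idiomatic
-- what changed: A scans the 69-char alphabet with str.find and does branch-and-wrap index arithmetic for every symbol; B precomputes the rotated alphabet once (shift taken mod 69), builds a str.maketrans table and returns message.translate(table) — one C-level table-driven pass.
import Mathlib
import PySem

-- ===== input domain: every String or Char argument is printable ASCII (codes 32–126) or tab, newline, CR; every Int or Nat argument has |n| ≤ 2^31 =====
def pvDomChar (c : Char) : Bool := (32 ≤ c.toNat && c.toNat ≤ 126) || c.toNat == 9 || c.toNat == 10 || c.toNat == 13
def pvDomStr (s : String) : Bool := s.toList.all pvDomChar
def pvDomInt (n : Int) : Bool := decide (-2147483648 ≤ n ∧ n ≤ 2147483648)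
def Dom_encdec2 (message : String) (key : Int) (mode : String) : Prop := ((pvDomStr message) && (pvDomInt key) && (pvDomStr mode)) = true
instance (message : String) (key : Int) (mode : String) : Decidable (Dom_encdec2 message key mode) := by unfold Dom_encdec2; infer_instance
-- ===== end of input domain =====

-- B replaces A's per-symbol find/branch/wrap loop by one precomputed rotated alphabet and a
-- translation table (str.maketrans/str.translate); neither version mutates its arguments.

-- The fixed 69-character alphabet both programs use (the Python constant LETTERS).
def pvL : List Char := "AaBbCcDdEeFfGgHhIiJjKkLlMmNnOoPpQqRrSsTtUuVvWwXxYyZz1234567890()!?,.@".toList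

-- ===== PORT A =====
-- one loop iteration of A: translate one symbol (none = the IndexError LETTERS[num] can raise)
def pvCharA (key : Int) (mode : String) (symbol : Char) : Option Char :=
  if PySem.Chars.isIn [symbol] pvL then
    let num := PySem.Chars.find pvL [symbol]
    let num := if mode = "cifrar" then num + key
               else if mode = "descifrar" then num - key else num
    let num := if num ≥ PySem.Chars.len pvL then num - PySem.Chars.len pvL
               else if num < 0 then num + PySem.Chars.len pvL else num
    PySem.List.pyGet? pvL num
  else some symbol

def encdec2 (message : String) (key : Int) (mode : String) : String :=
  let translated := message.toList.foldl
    (fun acc symbol => acc.bind (fun t => (pvCharA key mode symbol).map (fun ch => t ++ [ch])))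
    (some ([] : List Char))
  match translated with
  | some t => String.mk t
  | none => ""   -- unreachable under Pre_encdec2 (Python raises IndexError there)

-- ===== PORT B =====
def encdec2_alt (message : String) (key : Int) (mode : String) : String :=
  let shift : Int := if mode = "cifrar" then key else if mode = "descifrar" then -key else 0
  let r := PySem.Int.mod shift (PySem.Chars.len pvL)
  let rotated := PySem.List.slice pvL (some r) none ++ PySem.List.slice pvL none (some r)
  let table := PySem.Dict.ofList (pvL.zip rotated)
  String.mk (message.toList.map (fun c => table.getD c c))

-- ===== PRECONDITION & SPEC =====
-- Pre_ excludes exactly the inputs on which A raises IndexError: a symbol of the alphabet whose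
-- shifted index leaves [-138, 138), which A's single conditional wrap cannot bring back in range.
def Pre_encdec2 (message : String) (key : Int) (mode : String) : Prop :=
  ∀ c ∈ message.toList, c ∈ pvL →
    -138 ≤ (pvL.idxOf c : Int) + (if mode = "cifrar" then key else if mode = "descifrar" then -key else 0) ∧
    (pvL.idxOf c : Int) + (if mode = "cifrar" then key else if mode = "descifrar" then -key else 0) < 138
instance (message : String) (key : Int) (mode : String) : Decidable (Pre_encdec2 message key mode) := by
  unfold Pre_encdec2; exact List.decidableBAll _ _   -- (infer_instance finds the Char-Fintype ∀-instance, which 'decide' cannot evaluate)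

def pvWitness_encdec2 : String × Int × String := ("Hola!", 3, "cifrar")

def Spec_encdec2 (message : String) (key : Int) (mode : String) (out : String) : Prop := out = encdec2_alt message key mode
instance (message : String) (key : Int) (mode : String) (out : String) : Decidable (Spec_encdec2 message key mode out) := by unfold Spec_encdec2; infer_instance

-- ===== CLAIM (what is proved, stated in full; the proofs are below) =====
def Claim_equal_encdec2 : Prop := ∀ (message : String) (key : Int) (mode : String), Dom_encdec2 message key mode → Pre_encdec2 message key mode → Spec_encdec2 message key mode (encdec2 message key mode)

-- ===== LEMMAS AND PROOFS =====

theorem pv_len69 : pvL.length = 69 := by decide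
theorem pv_charsLen : PySem.Chars.len pvL = (69 : Int) := by decide

-- [c] is a prefix of l.drop i exactly when l[i] is c
theorem pv_pref_iff (c : Char) (l : List Char) (i : Nat) : [c] <+: l.drop i ↔ l[i]? = some c := by
  constructor
  · rintro ⟨t, ht⟩
    have h0 : (l.drop i)[0]? = l[i + 0]? := List.getElem?_drop
    rw [← ht] at h0; simpa using h0.symm
  · intro h
    have hi : i < l.length := by
      by_contra hc
      rw [List.getElem?_eq_none (by omega)] at h; cases h
    have hd : l.drop i = l[i] :: l.drop (i+1) := List.drop_eq_getElem_cons hi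
    have hc : l[i] = c := by rw [List.getElem?_eq_getElem hi] at h; exact Option.some.inj h
    exact ⟨l.drop (i+1), by rw [hd, hc]; rfl⟩

theorem pv_idxOf_le (c : Char) : ∀ (l : List Char) (n : Nat), l[n]? = some c → l.idxOf c ≤ n := by
  intro l
  induction l with
  | nil => intro n h; cases h
  | cons a t ih =>
    intro n h
    by_cases hac : a = c
    · simp [hac, List.idxOf_cons_self]
    · cases n with
      | zero => simp at h; exact absurd h hac
      | succ m =>
        simp at h
        have := ih m h
        simp [hac]
        omega

-- s.find(c) for a single character is its first index
theorem pv_find_singleton (c : Char) (L : List Char) (h : c ∈ L) :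
    PySem.Chars.find L [c] = (L.idxOf c : Int) := by
  have hnn : 0 ≤ PySem.Chars.find L [c] := by
    rw [PySem.Chars.find_nonneg_iff, List.singleton_infix_iff]; exact h
  obtain ⟨h1, h2⟩ := PySem.Chars.find_spec hnn
  rw [pv_pref_iff] at h1
  have hij : L.idxOf c ≤ (PySem.Chars.find L [c]).toNat := pv_idxOf_le c L _ h1
  have hji : ¬ (L.idxOf c < (PySem.Chars.find L [c]).toNat) := by
    intro hc
    exact h2 _ hc ((pv_pref_iff c L _).mpr
      (by rw [List.getElem?_eq_getElem (List.idxOf_lt_length_of_mem h)]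
          exact congrArg some (List.getElem_idxOf _)))
  have := Int.toNat_of_nonneg hnn
  omega

-- B's table on the 69 distinct alphabet keys: lookup of the i-th letter is rotated[i]
theorem pv_table_getD (R : List Char) (hlen : R.length = 69) (c : Char) (h : c ∈ pvL) :
    (PySem.Dict.ofList (pvL.zip R)).getD c c = R[pvL.idxOf c]'(by
      have := List.idxOf_lt_length_of_mem h
      have h69 : pvL.length = 69 := pv_len69
      omega) := by
  have h69 : pvL.length = 69 := pv_len69
  have hfst : (pvL.zip R).map Prod.fst = pvL := List.map_fst_zip (by omega)
  have hitems : (PySem.Dict.ofList (pvL.zip R)).items = pvL.zip R := by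
    show (List.foldl (fun acc p => acc.insert p.1 p.2) PySem.Dict.empty (pvL.zip R)).items = _
    rw [PySem.Dict.items_foldl_insert_fresh (pvL.zip R) Prod.fst Prod.snd PySem.Dict.empty
      (fun a _ => PySem.Dict.contains_empty _) (by rw [hfst]; decide)]
    simp [PySem.Dict.empty]
  have hkeys : (PySem.Dict.ofList (pvL.zip R)).keys = pvL := by
    show ((PySem.Dict.ofList (pvL.zip R)).items).map Prod.fst = pvL
    rw [hitems]; exact hfst
  apply PySem.Dict.getD_of_mem_items
  · rw [hitems]
    have hj := List.idxOf_lt_length_of_mem h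
    have hzl : (pvL.zip R).length = 69 := by rw [List.length_zip]; omega
    have hz : (pvL.zip R)[pvL.idxOf c]'(by omega) = (pvL[pvL.idxOf c], R[pvL.idxOf c]'(by omega)) :=
      List.getElem_zip
    rw [List.getElem_idxOf] at hz
    rw [← hz]
    exact List.getElem_mem _
  · rw [hkeys]; decide

theorem pv_table_getD_not (R : List Char) (hlen : R.length = 69) (c : Char) (h : c ∉ pvL) :
    (PySem.Dict.ofList (pvL.zip R)).getD c c = c := by
  have h69 : pvL.length = 69 := pv_len69
  have hfst : (pvL.zip R).map Prod.fst = pvL := List.map_fst_zip (by omega)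
  have hitems : (PySem.Dict.ofList (pvL.zip R)).items = pvL.zip R := by
    show (List.foldl (fun acc p => acc.insert p.1 p.2) PySem.Dict.empty (pvL.zip R)).items = _
    rw [PySem.Dict.items_foldl_insert_fresh (pvL.zip R) Prod.fst Prod.snd PySem.Dict.empty
      (fun a _ => PySem.Dict.contains_empty _) (by rw [hfst]; decide)]
    simp [PySem.Dict.empty]
  apply PySem.Dict.getD_of_not_contains
  rw [PySem.Dict.contains_eq_decide_mem_keys]
  have hkeys : (PySem.Dict.ofList (pvL.zip R)).keys = pvL := by
    show ((PySem.Dict.ofList (pvL.zip R)).items).map Prod.fst = pvL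
    rw [hitems]; exact hfst
  simp [hkeys, h]

theorem pv_rotlen (s : Int) :
    (PySem.List.slice pvL (some (PySem.Int.mod s 69)) none ++
     PySem.List.slice pvL none (some (PySem.Int.mod s 69))).length = 69 := by
  have hr0 : 0 ≤ PySem.Int.mod s 69 := PySem.Int.mod_nonneg s (by omega)
  have hrlt : PySem.Int.mod s 69 < 69 := PySem.Int.mod_lt s (by omega)
  rw [List.length_append, PySem.List.slice_from _ hr0, PySem.List.slice_to _ hr0,
    List.length_drop, List.length_take]
  have h69 : pvL.length = 69 := pv_len69
  omega

-- rotated[j] is the alphabet letter at (j + s) mod 69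
theorem pv_rot (s : Int) (j : Nat) (hj : j < 69)
    (hK : (((j : Int) + s) % 69).toNat < pvL.length) :
    (PySem.List.slice pvL (some (PySem.Int.mod s 69)) none ++
     PySem.List.slice pvL none (some (PySem.Int.mod s 69)))[j]? =
    some (pvL[(((j : Int) + s) % 69).toNat]'hK) := by
  have h69 : pvL.length = 69 := pv_len69
  have hr0 : 0 ≤ PySem.Int.mod s 69 := PySem.Int.mod_nonneg s (by omega)
  have hrlt : PySem.Int.mod s 69 < 69 := PySem.Int.mod_lt s (by omega)
  have hme : PySem.Int.mod s 69 = s % 69 := PySem.Int.mod_eq_emod_of_pos (by omega)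
  rw [PySem.List.slice_from _ hr0, PySem.List.slice_to _ hr0]
  set rN := (PySem.Int.mod s 69).toNat with hrN
  have hdl : (pvL.drop rN).length = 69 - rN := by rw [List.length_drop]; omega
  have hj' : j < 69 := hj
  by_cases hcase : j < 69 - rN
  · rw [List.getElem?_append_left (by omega), List.getElem?_drop,
      List.getElem?_eq_getElem (by omega)]
    exact congrArg some (getElem_congr_idx (by omega))
  · rw [List.getElem?_append_right (by omega), hdl, List.getElem?_take, if_pos (by omega),
      List.getElem?_eq_getElem (by omega)]
    exact congrArg some (getElem_congr_idx (by omega))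

-- A's single-wrap indexing (with Python's negative-index rule) lands on (j + s) mod 69
theorem pv_getA (s : Int) (j : Nat)
    (hb1 : -138 ≤ (j : Int) + s) (hb2 : (j : Int) + s < 138)
    (hK : (((j : Int) + s) % 69).toNat < pvL.length) :
    PySem.List.pyGet? pvL
      (if (j : Int) + s ≥ 69 then (j : Int) + s - 69
       else if (j : Int) + s < 0 then (j : Int) + s + 69 else (j : Int) + s) =
    some (pvL[(((j : Int) + s) % 69).toNat]'hK) := by
  have h69 : pvL.length = 69 := pv_len69
  simp only [PySem.List.pyGet?, PySem.List.pyIdx?, h69]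
  split_ifs <;>
    simp only [Option.bind] <;>
    first
      | (rw [List.getElem?_eq_getElem (by omega)];
         exact congrArg some (getElem_congr_idx (by omega)))
      | omega

-- the character B's table maps c to
def pvCharB (key : Int) (mode : String) (c : Char) : Char :=
  let shift : Int := if mode = "cifrar" then key else if mode = "descifrar" then -key else 0
  let r := PySem.Int.mod shift (PySem.Chars.len pvL)
  let rotated := PySem.List.slice pvL (some r) none ++ PySem.List.slice pvL none (some r)
  (PySem.Dict.ofList (pvL.zip rotated)).getD c c

theorem pv_alt_eq_map (message : String) (key : Int) (mode : String) :
    encdec2_alt message key mode = String.mk (message.toList.map (pvCharB key mode)) := rfl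

theorem pv_char_eq (key : Int) (mode : String) (c : Char)
    (hpre : c ∈ pvL →
      -138 ≤ (pvL.idxOf c : Int) + (if mode = "cifrar" then key else if mode = "descifrar" then -key else 0) ∧
      (pvL.idxOf c : Int) + (if mode = "cifrar" then key else if mode = "descifrar" then -key else 0) < 138) :
    pvCharA key mode c = some (pvCharB key mode c) := by
  by_cases hmem : c ∈ pvL
  · obtain ⟨hb1, hb2⟩ := hpre hmem
    have hisin : PySem.Chars.isIn [c] pvL = true := by
      rw [PySem.Chars.isIn_iff_infix, List.singleton_infix_iff]; exact hmem
    have hj : pvL.idxOf c < 69 := by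
      have := List.idxOf_lt_length_of_mem hmem; have := pv_len69; omega
    set s : Int := if mode = "cifrar" then key else if mode = "descifrar" then -key else 0 with hs
    have hK : ((((pvL.idxOf c) : Int) + s) % 69).toNat < pvL.length := by
      have := pv_len69; omega
    unfold pvCharA pvCharB
    simp only [pv_charsLen, hisin, if_true, pv_find_singleton c pvL hmem, ← hs]
    have hnum : (if mode = "cifrar" then ((pvL.idxOf c : Int)) + key
                 else if mode = "descifrar" then ((pvL.idxOf c : Int)) - key
                 else ((pvL.idxOf c : Int))) = (pvL.idxOf c : Int) + s := by
      rw [hs]; split_ifs <;> ring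
    rw [hnum, pv_table_getD _ (pv_rotlen s) c hmem]
    have hrot := pv_rot s (pvL.idxOf c) hj hK
    rw [List.getElem?_eq_getElem (by rw [pv_rotlen s]; omega)] at hrot
    exact (pv_getA s (pvL.idxOf c) hb1 hb2 hK).trans hrot.symm
  · unfold pvCharA pvCharB
    have hisin : PySem.Chars.isIn [c] pvL = false := by
      rw [PySem.Chars.isIn_eq_false_iff, List.singleton_infix_iff]; exact hmem
    simp only [pv_charsLen, hisin, if_false, Bool.false_eq_true]
    rw [pv_table_getD_not _ (pv_rotlen _) c hmem]

theorem pv_fold_eq (key : Int) (mode : String) (l : List Char)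
    (h : ∀ c ∈ l, pvCharA key mode c = some (pvCharB key mode c)) :
    ∀ t : List Char,
      l.foldl (fun acc symbol => acc.bind (fun t => (pvCharA key mode symbol).map (fun ch => t ++ [ch])))
        (some t) = some (t ++ l.map (pvCharB key mode)) := by
  induction l with
  | nil => intro t; simp
  | cons a l ih =>
    intro t
    simp only [List.foldl_cons, Option.bind_some, h a (by simp), Option.map_some, List.map_cons]
    rw [ih (fun c hc => h c (by simp [hc]))]
    simp

-- ===== VERDICT (by name: the statement is the Claim_ definition above) =====
theorem encdec2_spec : Claim_equal_encdec2 := by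
  intro message key mode _ hpre
  unfold Spec_encdec2
  rw [pv_alt_eq_map]
  unfold encdec2
  rw [pv_fold_eq key mode _ (fun c hc => pv_char_eq key mode c (hpre c hc))]
  simp
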